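-- pv_equiv track=rewrite | github.com/AntoineCezar/diamond-kata-python | kata.py | diamond_lines
-- ===== SOURCE A (Python) =====
-- from string import ascii_letters
--
-- def tail(string):
--     return string[1:]
--
-- def reverse(string):
--     return string[::-1]
--
-- def mirror(string):
--     return string + tail(reverse(string))
--
-- def diamond_letters(letter):
--     last_letter_position = ascii_letters.find(letter) + 1
--     return ascii_letters[:last_letter_position]
--
-- def erase_when_not(letter):
--     return lambda candidate: candidate if candidate == letter else ' '
--
-- def erase_other_letters(letter, string):
--     return ''.join(map(erase_when_not(letter), string))
--
-- def diamond_lines(letter):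
--     lines = []
--     letters = reverse(diamond_letters(letter))
--
--     for letter in reverse(letters):
--         partial_line = erase_other_letters(letter, letters)
--         line = mirror(partial_line)
--         lines.append(line)
--
--     return mirror(lines)
-- ===== SOURCE B (Python) =====
-- from string import ascii_letters
--
-- def diamond_lines(letter):
--     letters = ascii_letters[:ascii_letters.find(letter) + 1]
--     n = len(letters)
--     if n == 0:
--         return []
--     top = []
--     for i in range(n):
--         row = [' '] * (2 * n - 1)
--         row[n - 1 - i] = letters[i]
--         row[n - 1 + i] = letters[i]
--         top.append(''.join(row))
--     return top + top[:-1][::-1]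
-- ===== Notes on version B (the rewrite author's own statement) =====
-- stated objective: simpler
-- what changed: Instead of building every line by masking the whole reversed letter string (erase-all-but-one per letter) and mirroring each string, B writes each letter directly at its two positions in a row of spaces and mirrors only the list of top lines.
import Mathlib
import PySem

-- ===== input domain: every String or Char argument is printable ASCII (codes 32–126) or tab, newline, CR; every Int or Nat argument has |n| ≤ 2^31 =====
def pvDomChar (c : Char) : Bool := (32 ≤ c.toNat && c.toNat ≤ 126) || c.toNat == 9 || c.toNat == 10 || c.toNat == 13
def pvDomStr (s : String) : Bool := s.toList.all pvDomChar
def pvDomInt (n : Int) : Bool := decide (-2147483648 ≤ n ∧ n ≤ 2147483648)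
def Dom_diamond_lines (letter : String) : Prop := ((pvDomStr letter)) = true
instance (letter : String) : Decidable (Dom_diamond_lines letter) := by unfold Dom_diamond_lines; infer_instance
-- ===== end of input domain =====

-- B replaces A's per-line erase-then-mirror string masking by direct placement of each
-- letter at its two positions in a row of spaces, mirroring only the list of top lines
-- (objective: simpler; return value only, neither program mutates its argument).

-- ===== PORT A =====
def pvAscii : List Char := "abcdefghijklmnopqrstuvwxyzABCDEFGHIJKLMNOPQRSTUVWXYZ".toList

-- tail(string) = string[1:]
def pvTail {α : Type} (xs : List α) : List α := PySem.List.slice xs (some 1) none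

-- reverse(string) = string[::-1]  (step -1: slice?; the step is never 0, so getD is never the default)
def pvRev {α : Type} (xs : List α) : List α := (PySem.List.slice? xs none none (-1)).getD []

def pvMirror {α : Type} (xs : List α) : List α := xs ++ pvTail (pvRev xs)

-- diamond_letters(letter) = ascii_letters[:ascii_letters.find(letter) + 1]
def pvDiamondLetters (letter : String) : List Char :=
  PySem.List.slice pvAscii none (some (PySem.Chars.find pvAscii letter.toList + 1))

def pvEraseWhenNot (letter : Char) : Char → Char := fun c => if c = letter then c else ' '

-- ''.join(map(erase_when_not(letter), string))
def pvEraseOtherLetters (letter : Char) (s : List Char) : List Char :=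
  PySem.Chars.join [] (s.map (fun c => [pvEraseWhenNot letter c]))

def pvBodyA (letters0 : List Char) : List String :=
  let letters := pvRev letters0
  let lines := (pvRev letters).foldl (fun lines l =>
      lines ++ [String.ofList (pvMirror (pvEraseOtherLetters l letters))]) ([] : List String)
  pvMirror lines

def diamond_lines (letter : String) : List String := pvBodyA (pvDiamondLetters letter)

-- ===== PORT B =====
-- row = [' '] * (2n-1); row[n-1-i] = letters[i]; row[n-1+i] = letters[i]
-- (i < n always, so Python's in-range indexing letters[i] is List.getD; the default is unreachable)
def pvRowB (letters : List Char) (n i : Nat) : List Char :=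
  ((List.replicate (2*n-1) ' ').set (n-1-i) (letters.getD i ' ')).set (n-1+i) (letters.getD i ' ')

def pvBodyB (letters : List Char) : List String :=
  let n := letters.length
  if n = 0 then []
  else
    let top := (List.range n).map (fun i => String.ofList (pvRowB letters n i))
    -- top + top[:-1][::-1]
    top ++ (PySem.List.slice? (PySem.List.slice top none (some (-1))) none none (-1)).getD []

def diamond_lines_alt (letter : String) : List String :=
  pvBodyB (PySem.List.slice pvAscii none (some (PySem.Chars.find pvAscii letter.toList + 1)))

-- ===== PRECONDITION & SPEC =====
def Spec_diamond_lines (letter : String) (out : List String) : Prop := out = diamond_lines_alt letter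
instance (letter : String) (out : List String) : Decidable (Spec_diamond_lines letter out) := by unfold Spec_diamond_lines; infer_instance

-- ===== CLAIM (what is proved, stated in full; the proofs are below) =====
def Claim_equal_diamond_lines : Prop := ∀ (letter : String), Dom_diamond_lines letter → Spec_diamond_lines letter (diamond_lines letter)

-- ===== LEMMAS AND PROOFS =====

theorem pvRev_eq {α : Type} (xs : List α) : pvRev xs = xs.reverse := by
  simp [pvRev, PySem.List.slice?_none_none_neg_one]

theorem pvTail_eq {α : Type} (xs : List α) : pvTail xs = xs.tail := by
  simp [pvTail, PySem.List.slice_from_one]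

theorem pvMirror_eq {α : Type} (xs : List α) : pvMirror xs = xs ++ xs.dropLast.reverse := by
  simp [pvMirror, pvRev_eq, pvTail_eq, List.tail_reverse]

theorem pvEraseOtherLetters_eq (letter : Char) (s : List Char) :
    pvEraseOtherLetters letter s = s.map (pvEraseWhenNot letter) := by
  unfold pvEraseOtherLetters
  rw [show (fun c => [pvEraseWhenNot letter c]) = (fun x => [x]) ∘ pvEraseWhenNot letter from rfl,
      ← List.map_map]
  exact PySem.Chars.join_nil_singletons _

-- masking the reversed letters keeps exactly one letter, at position n-1-i
theorem erase_reverse_eq (s : List Char) (i : Nat) (hn : s.Nodup) (hi : i < s.length) :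
    s.reverse.map (pvEraseWhenNot s[i])
      = (List.replicate s.length ' ').set (s.length - 1 - i) s[i] := by
  apply List.ext_getElem <;> simp [pvEraseWhenNot]
  intro k hk _
  rw [List.getElem_set]
  by_cases h : s.length - 1 - i = k
  · have h2 : s.length - 1 - k = i := by omega
    simp [h, h2]
  · rw [if_neg h, List.getElem_replicate, if_neg]
    intro he
    have : s.length - 1 - k = i := (List.Nodup.getElem_inj_iff hn).mp he
    omega

-- mirroring the one-letter mask is the double placement in a row of 2n-1 spaces
theorem mirror_mask_eq (n i : Nat) (c : Char) (hi : i < n) :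
    ((List.replicate n ' ').set (n-1-i) c) ++ (((List.replicate n ' ').set (n-1-i) c).reverse.tail)
      = ((List.replicate (2*n-1) ' ').set (n-1-i) c).set (n-1+i) c := by
  apply List.ext_getElem
  · simp; omega
  intro k h1 h2
  simp only [List.length_append, List.length_set, List.length_replicate, List.length_tail,
    List.length_reverse] at h1 h2
  simp only [List.getElem_append, List.getElem_tail, List.getElem_reverse, List.getElem_set,
    List.getElem_replicate, List.length_set, List.length_replicate] at *
  split_ifs <;> first | rfl | omega

theorem body_eq (s : List Char) (hn : s.Nodup) : pvBodyA s = pvBodyB s := by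
  rcases eq_or_ne s [] with rfl | hne
  · rfl
  · have hlen : s.length ≠ 0 := by simpa [List.length_eq_zero_iff] using hne
    unfold pvBodyA pvBodyB
    simp only [pvRev_eq, List.reverse_reverse, PySem.List.foldl_append_singleton_eq_map,
      hlen, if_false]
    have hlines : s.map (fun l => String.ofList (pvMirror (pvEraseOtherLetters l s.reverse)))
        = (List.range s.length).map (fun i => String.ofList (pvRowB s s.length i)) := by
      apply List.ext_getElem
      · simp
      intro i h1 h2
      simp only [List.getElem_map, List.getElem_range]
      have hi : i < s.length := by simpa using h1
      congr 1
      rw [pvEraseOtherLetters_eq, erase_reverse_eq s i hn hi, pvMirror_eq,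
          ← List.tail_reverse, mirror_mask_eq s.length i s[i] hi]
      simp [pvRowB, List.getElem?_eq_getElem hi]
    rw [hlines, pvMirror_eq]
    simp [PySem.List.slice_to_neg_one, PySem.List.slice?_none_none_neg_one]

theorem slice_take (b : Int) (xs : List Char) :
    PySem.List.slice xs none (some b) = xs.take (PySem.List.clampIdx xs.length b) := by
  simp [PySem.List.slice]

theorem pvAscii_nodup : pvAscii.Nodup := by decide

-- ===== VERDICT (by name: the statement is the Claim_ definition above) =====
theorem diamond_lines_spec : Claim_equal_diamond_lines := by
  intro letter _
  unfold Spec_diamond_lines diamond_lines diamond_lines_alt pvDiamondLetters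
  rw [slice_take]
  exact body_eq _ (pvAscii_nodup.sublist (List.take_sublist _ _))
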